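-- pv_equiv track=rewrite | github.com/wumin1013/PPO_article | PPO_project/tools/accept_p7_1_corridor_free_amp.py | _first_true_segment
-- ===== SOURCE A (Python) =====
-- from typing import Dict, List, Mapping, MutableMapping, Optional, Sequence, Tuple
--
-- def _first_true_segment(mask: Sequence[bool]) -> Optional[Tuple[int, int]]:
--     """Return [start,end] inclusive indices for the first contiguous True segment."""
--     start = None
--     for i, v in enumerate(mask):
--         if v and start is None:
--             start = i
--         if start is not None and (not v):
--             return start, i - 1
--     if start is not None:
--         return start, len(mask) - 1
--     return None
-- ===== SOURCE B (Python) =====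
-- from typing import Dict, List, Mapping, MutableMapping, Optional, Sequence, Tuple
--
-- def _first_true_segment(mask: Sequence[bool]) -> Optional[Tuple[int, int]]:
--     """Return [start,end] inclusive indices for the first contiguous True segment.
--
--     Different algorithm: first run-length-encode the mask into maximal runs of
--     equal truthiness, then scan the run list with a cumulative start index and
--     return the span of the first True run."""
--     runs = []  # list of [truthiness, length], maximal runs in order
--     for v in mask:
--         t = bool(v)
--         if runs and runs[-1][0] == t:
--             runs[-1][1] += 1
--         else:
--             runs.append([t, 1])
--     idx = 0
--     for t, length in runs:
--         if t:
--             return idx, idx + length - 1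
--         idx += length
--     return None
-- ===== Notes on version B (the rewrite author's own statement) =====
-- stated objective: alternative
-- what changed: Replaces A's single flagged scan by a run-length encoding of the mask into maximal equal-truthiness runs followed by a scan over the run list that returns the span of the first True run.
import Mathlib
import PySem

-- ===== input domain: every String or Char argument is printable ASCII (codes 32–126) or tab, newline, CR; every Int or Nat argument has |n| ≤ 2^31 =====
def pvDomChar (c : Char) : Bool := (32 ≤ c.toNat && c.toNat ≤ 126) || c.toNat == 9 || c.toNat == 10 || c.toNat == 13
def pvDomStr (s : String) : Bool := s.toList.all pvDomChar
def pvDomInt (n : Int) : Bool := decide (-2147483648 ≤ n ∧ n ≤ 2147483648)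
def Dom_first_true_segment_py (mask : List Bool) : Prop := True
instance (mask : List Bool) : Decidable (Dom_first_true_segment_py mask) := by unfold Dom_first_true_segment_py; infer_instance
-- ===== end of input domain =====

-- B replaces A's flagged single scan by a run-length encoding of the mask followed by a scan over the runs; proved equal on all inputs.


-- ===== PORT A =====
-- loop over enumerate(mask) with state `start : Option Int`; `n` is len(mask), used by the post-loop return
def ftsA_go (xs : List Bool) (i : Int) (start : Option Int) (n : Int) : Option (Int × Int) :=
  match xs with
  | [] =>
    match start with
    | some s => some (s, n - 1)
    | none => none
  | v :: rest =>
    let start' : Option Int := if v ∧ start = none then some i else start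
    match start' with
    | some s => if ¬ v then some (s, i - 1) else ftsA_go rest (i + 1) (some s) n
    | none => ftsA_go rest (i + 1) none n

def first_true_segment_py (mask : List Bool) : Option (Int × Int) :=
  ftsA_go mask 0 none (mask.length : Int)

-- ===== PORT B =====
-- Source B's first loop body: absorb one element into the run list (extend the last run or append a new one)
def ftsB_push (runs : List (Bool × Int)) (t : Bool) : List (Bool × Int) :=
  match runs with
  | [] => [(t, 1)]
  | [(c, n)] => if c == t then [(c, n + 1)] else [(c, n), (t, 1)]
  | r :: rs => r :: ftsB_push rs t

-- Source B's second loop: scan the runs with cumulative start index, return the span of the first True run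
def ftsB_scan (runs : List (Bool × Int)) (idx : Int) : Option (Int × Int) :=
  match runs with
  | [] => none
  | (t, len) :: rs => if t then some (idx, idx + len - 1) else ftsB_scan rs (idx + len)

def first_true_segment_py_alt (mask : List Bool) : Option (Int × Int) :=
  ftsB_scan (mask.foldl ftsB_push []) 0

-- ===== PRECONDITION & SPEC =====
def Spec_first_true_segment_py (mask : List Bool) (out : Option (Int × Int)) : Prop := out = first_true_segment_py_alt mask
instance (mask : List Bool) (out : Option (Int × Int)) : Decidable (Spec_first_true_segment_py mask out) := by unfold Spec_first_true_segment_py; infer_instance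

-- ===== CLAIM (what is proved, stated in full; the proofs are below) =====
def Claim_equal_first_true_segment_py : Prop := ∀ (mask : List Bool), Dom_first_true_segment_py mask → Spec_first_true_segment_py mask (first_true_segment_py mask)

-- ===== LEMMAS AND PROOFS =====
-- proof-side characterisation of the result: first truthy index with the tail after it …
def ftsP_findStart (xs : List Bool) (i : Int) : Option (Int × List Bool) :=
  match xs with
  | [] => none
  | v :: rest => if v then some (i, rest) else ftsP_findStart rest (i + 1)

-- … and the end of the run starting at index j
def ftsP_extend (xs : List Bool) (j : Int) : Int :=
  match xs with
  | [] => j - 1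
  | v :: rest => if v then ftsP_extend rest (j + 1) else j - 1

def ftsP_go (xs : List Bool) (i : Int) : Option (Int × Int) :=
  match ftsP_findStart xs i with
  | none => none
  | some (s, rest) => some (s, ftsP_extend rest (s + 1))

-- A-side: once start is set to s, A's remaining loop returns (s, ftsP_extend xs i), provided n = i + |xs|.
theorem ftsA_go_some (xs : List Bool) : ∀ (i s n : Int), n = i + xs.length →
    ftsA_go xs i (some s) n = some (s, ftsP_extend xs i) := by
  induction xs with
  | nil => intro i s n h; simp at h; simp [ftsA_go, ftsP_extend, h]
  | cons v rest ih =>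
    intro i s n h
    simp only [ftsA_go, ftsP_extend]
    by_cases hv : v
    · simp [hv]; exact ih (i + 1) s n (by simp at h ⊢; omega)
    · simp [hv]

theorem ftsA_go_none (xs : List Bool) : ∀ (i n : Int), n = i + xs.length →
    ftsA_go xs i none n = ftsP_go xs i := by
  induction xs with
  | nil => intro i n h; simp [ftsA_go, ftsP_go, ftsP_findStart]
  | cons v rest ih =>
    intro i n h
    by_cases hv : v
    · simp only [ftsA_go, ftsP_go, ftsP_findStart, hv]
      simp
      exact ftsA_go_some rest (i + 1) i n (by simp at h ⊢; omega)
    · simp only [ftsA_go, ftsP_go, ftsP_findStart, hv]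
      simp
      have := ih (i + 1) n (by simp at h ⊢; omega)
      simpa [ftsP_go] using this

-- B-side: ftsB_push keeps the run list nonempty …
theorem ftsB_push_ne (runs : List (Bool × Int)) (t : Bool) : ftsB_push runs t ≠ [] := by
  match runs with
  | [] => simp [ftsB_push]
  | [(c, n)] => simp only [ftsB_push]; split <;> simp
  | r :: r' :: rs => simp [ftsB_push]

-- … and never touches any run before the last one.
theorem foldl_push_cons (xs : List Bool) : ∀ (r : Bool × Int) (rs : List (Bool × Int)), rs ≠ [] →
    xs.foldl ftsB_push (r :: rs) = r :: xs.foldl ftsB_push rs := by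
  induction xs with
  | nil => intro r rs _; rfl
  | cons v xs ih =>
    intro r rs hrs
    have hpush : ftsB_push (r :: rs) v = r :: ftsB_push rs v := by
      match rs, hrs with
      | r' :: rs', _ => rfl
    simp only [List.foldl, hpush]
    exact ih r (ftsB_push rs v) (ftsB_push_ne rs v)

-- accumulating into a True run of length m starting at scan index i
theorem foldl_push_true (xs : List Bool) : ∀ (m i : Int),
    ftsB_scan (xs.foldl ftsB_push [(true, m)]) i = some (i, ftsP_extend xs (i + m)) := by
  induction xs with
  | nil => intro m i; simp [ftsB_scan, ftsP_extend]
  | cons v xs ih =>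
    intro m i
    by_cases hv : v
    · subst hv
      have : ftsB_push [(true, m)] true = [(true, m + 1)] := by simp [ftsB_push]
      simp only [List.foldl, this]
      rw [ih (m + 1) i]
      simp [ftsP_extend, Int.add_assoc]
    · simp only [Bool.not_eq_true] at hv; subst hv
      have : ftsB_push [(true, m)] false = [(true, m), (false, 1)] := by simp [ftsB_push]
      simp only [List.foldl, this]
      rw [foldl_push_cons xs (true, m) [(false, 1)] (by simp)]
      simp [ftsB_scan, ftsP_extend]

-- accumulating into a False run of length k starting at scan index i
theorem foldl_push_false (xs : List Bool) : ∀ (k i : Int),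
    ftsB_scan (xs.foldl ftsB_push [(false, k)]) i = ftsP_go xs (i + k) := by
  induction xs with
  | nil => intro k i; simp [ftsB_scan, ftsP_go, ftsP_findStart]
  | cons v xs ih =>
    intro k i
    by_cases hv : v
    · subst hv
      have : ftsB_push [(false, k)] true = [(false, k), (true, 1)] := by simp [ftsB_push]
      simp only [List.foldl, this]
      rw [foldl_push_cons xs (false, k) [(true, 1)] (by simp)]
      simp only [ftsB_scan, Bool.false_eq_true, if_false]
      rw [foldl_push_true xs 1 (i + k)]
      simp [ftsP_go, ftsP_findStart]
    · simp only [Bool.not_eq_true] at hv; subst hv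
      have : ftsB_push [(false, k)] false = [(false, k + 1)] := by simp [ftsB_push]
      simp only [List.foldl, this]
      rw [ih (k + 1) i]
      simp [ftsP_go, ftsP_findStart, Int.add_assoc]

theorem alt_eq_go (mask : List Bool) : first_true_segment_py_alt mask = ftsP_go mask 0 := by
  unfold first_true_segment_py_alt
  match mask with
  | [] => rfl
  | v :: xs =>
    by_cases hv : v
    · subst hv
      simp only [List.foldl, ftsB_push]
      rw [foldl_push_true xs 1 0]
      simp [ftsP_go, ftsP_findStart]
    · simp only [Bool.not_eq_true] at hv; subst hv
      simp only [List.foldl, ftsB_push]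
      rw [foldl_push_false xs 1 0]
      simp [ftsP_go, ftsP_findStart]

-- ===== VERDICT (by name: the statement is the Claim_ definition above) =====
theorem first_true_segment_py_spec : Claim_equal_first_true_segment_py := by
  intro mask _
  unfold Spec_first_true_segment_py first_true_segment_py
  rw [alt_eq_go]
  exact ftsA_go_none mask 0 (mask.length : Int) (by simp)
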